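-- pv_equiv track=rewrite | github.com/EIT-EAST-Lab/C3 | openrlhf/utils/run_metadata.py | safe_slug
-- ===== SOURCE A (Python) =====
-- def safe_slug(text: str) -> str:
--     """Filesystem-safe slug."""
--     s = str(text or "").strip()
--     if not s:
--         return "run"
--     for ch in ["/", "\\", ":", "|", "\n", "\r", "\t"]:
--         s = s.replace(ch, "_")
--     # collapse spaces
--     s = "_".join([p for p in s.split(" ") if p])
--     return s[:200]
-- ===== SOURCE B (Python) =====
-- def safe_slug(text: str) -> str:
--     """Filesystem-safe slug: one pass over the stripped string."""
--     s = str(text or "").strip()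
--     if not s:
--         return "run"
--     out = []
--     pending_space = False
--     for ch in s:
--         if ch == ' ':
--             pending_space = True
--         else:
--             if pending_space:
--                 out.append('_')
--                 pending_space = False
--             out.append('_' if ch in '/\\:|\n\r\t' else ch)
--     return ''.join(out)[:200]
-- ===== Notes on version B (the rewrite author's own statement) =====
-- stated objective: alternative
-- what changed: Replaces the seven sequential str.replace passes plus split/filter/join with a single character scan over the stripped string that maintains a pending_space flag to collapse space runs and map special characters in one traversal.
import Mathlib
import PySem

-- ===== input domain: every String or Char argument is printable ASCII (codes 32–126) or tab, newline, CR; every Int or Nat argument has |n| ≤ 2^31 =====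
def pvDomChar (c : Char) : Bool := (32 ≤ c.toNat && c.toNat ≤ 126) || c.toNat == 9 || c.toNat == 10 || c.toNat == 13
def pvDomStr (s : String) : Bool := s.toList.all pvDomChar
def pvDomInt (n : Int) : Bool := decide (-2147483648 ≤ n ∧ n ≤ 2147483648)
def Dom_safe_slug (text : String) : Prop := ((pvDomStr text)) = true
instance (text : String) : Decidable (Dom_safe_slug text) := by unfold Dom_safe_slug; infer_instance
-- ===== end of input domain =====

-- B builds the slug in one scan with a pending-space flag instead of A's seven replace passes plus split/filter/join (alternative decomposition, same asymptotic cost).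

-- ===== PORT A =====
def safe_slug (text : String) : String :=
  let s := PySem.Str.strip (if text = "" then "" else text)   -- str(text or "").strip()
  if s = "" then "run"
  else
    let s := ["/", "\\", ":", "|", "\n", "\r", "\t"].foldl
      (fun acc ch => PySem.Str.replace acc ch "_") s
    -- s.split(" ") has a non-empty separator; PySem.Chars.splitOn is that form
    let parts := PySem.Chars.splitOn s.toList [' ']
    let s := PySem.Chars.join ['_'] (parts.filter (fun p => p ≠ []))
    String.ofList (PySem.Chars.slice s none (some 200))       -- s[:200]

-- ===== PORT B =====
-- B-side helper: ch in '/\\:|\n\r\t'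
def slugSpecial (c : Char) : Bool := ['/', '\\', ':', '|', '\n', '\r', '\t'].contains c

def safe_slug_alt (text : String) : String :=
  let s := PySem.Str.strip (if text = "" then "" else text)
  if s = "" then "run"
  else
    let st := s.toList.foldl
      (fun (st : List Char × Bool) ch =>
        if ch = ' ' then (st.1, true)
        else ((if st.2 then st.1 ++ ['_'] else st.1) ++ [if slugSpecial ch then '_' else ch], false))
      ([], false)
    String.ofList (st.1.take 200)                             -- ''.join(out)[:200]

-- ===== PRECONDITION & SPEC =====
def Spec_safe_slug (text : String) (out : String) : Prop := out = safe_slug_alt text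
instance (text : String) (out : String) : Decidable (Spec_safe_slug text out) := by unfold Spec_safe_slug; infer_instance

-- ===== CLAIM (what is proved, stated in full; the proofs are below) =====
def Claim_equal_safe_slug : Prop := ∀ (text : String), Dom_safe_slug text → Spec_safe_slug text (safe_slug text)

-- ===== LEMMAS AND PROOFS =====

-- character substitution performed by the seven replaces / by B's branch
def slugSub (c : Char) : Char := if slugSpecial c then '_' else c

-- the scan B performs, as a pure recursion over the characters
def slugScan : List Char → Bool → List Char
  | [], _ => []
  | c :: t, p =>
    if c = ' ' then slugScan t true
    else (if p then ['_'] else []) ++ slugSub c :: slugScan t false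

-- split-on-space as a simple recursion (what splitOn.go computes, acc factored out)
def spGo : List Char → List Char → List (List Char)
  | [], cur => [cur.reverse]
  | c :: rest, cur => if c = ' ' then cur.reverse :: spGo rest [] else spGo rest (c :: cur)

lemma splitOn_go_eq (fuel : Nat) : ∀ (l cur : List Char) (acc : List (List Char)), l.length ≤ fuel →
    PySem.Chars.splitOn.go [' '] fuel l cur acc = acc.reverse ++ spGo l cur := by
  induction fuel with
  | zero =>
    intro l cur acc h
    have : l = [] := by cases l <;> simp_all
    subst this
    simp [PySem.Chars.splitOn.go, spGo]
  | succ n ih =>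
    intro l cur acc h
    cases l with
    | nil => simp [PySem.Chars.splitOn.go, spGo]
    | cons c rest =>
      simp only [PySem.Chars.splitOn.go, List.isPrefixOf, Bool.and_true]
      by_cases hc : c = ' '
      · subst hc
        simp only [beq_self_eq_true, if_pos, List.length_cons, List.drop_succ_cons,
          List.length_nil, List.drop_zero]
        rw [ih rest [] (cur.reverse :: acc) (by simpa using Nat.le_of_succ_le_succ h)]
        simp [spGo]
      · have : (' ' == c) = false := by simpa using fun hh => hc hh.symm
        simp only [this, Bool.false_and, if_neg Bool.false_ne_true]
        rw [ih rest (c :: cur) acc (by simpa using Nat.le_of_succ_le_succ h)]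
        simp [spGo, hc]

lemma splitOn_space (l : List Char) :
    PySem.Chars.splitOn l [' '] = spGo l [] := by
  unfold PySem.Chars.splitOn
  rw [splitOn_go_eq (l.length + 1) l [] [] (by omega)]
  simp

lemma replace_go_single (c r : Char) (fuel : Nat) : ∀ (l acc : List Char), l.length ≤ fuel →
    PySem.Chars.replace.go [c] [r] fuel l acc
      = acc.reverse ++ l.map (fun x => if x = c then r else x) := by
  induction fuel with
  | zero =>
    intro l acc h
    have : l = [] := by cases l <;> simp_all
    subst this
    simp [PySem.Chars.replace.go]
  | succ n ih =>
    intro l acc h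
    cases l with
    | nil => simp [PySem.Chars.replace.go]
    | cons x rest =>
      simp only [PySem.Chars.replace.go, List.isPrefixOf, Bool.and_true]
      by_cases hx : x = c
      · subst hx
        simp only [beq_self_eq_true, if_pos, List.length_cons, List.length_singleton,
          List.drop_succ_cons, List.length_nil, List.drop_zero]
        rw [ih rest ([r].reverse ++ acc) (by simpa using Nat.le_of_succ_le_succ h)]
        simp
      · have : (c == x) = false := by simpa using fun hh => hx hh.symm
        simp only [this, Bool.false_and, if_neg Bool.false_ne_true]
        rw [ih rest (x :: acc) (by simpa using Nat.le_of_succ_le_succ h)]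
        simp [hx]

lemma replace_single (l : List Char) (c r : Char) :
    PySem.Chars.replace l [c] [r] = l.map (fun x => if x = c then r else x) := by
  unfold PySem.Chars.replace
  simp only [List.isEmpty_cons, if_neg Bool.false_ne_true]
  rw [replace_go_single c r l.length l [] le_rfl]
  simp

-- the seven replaces compose to slugSub
lemma replaces_eq_map (s : String) :
    (["/", "\\", ":", "|", "\n", "\r", "\t"].foldl
      (fun acc ch => PySem.Str.replace acc ch "_") s).toList = s.toList.map slugSub := by
  simp only [List.foldl_cons, List.foldl_nil, PySem.Str.toList_replace]
  rw [show ("/" : String).toList = ['/'] from rfl, show ("\\" : String).toList = ['\\'] from rfl,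
      show (":" : String).toList = [':'] from rfl, show ("|" : String).toList = ['|'] from rfl,
      show ("\n" : String).toList = ['\n'] from rfl, show ("\r" : String).toList = ['\r'] from rfl,
      show ("\t" : String).toList = ['\t'] from rfl, show ("_" : String).toList = ['_'] from rfl]
  simp only [replace_single, List.map_map]
  refine List.map_congr_left (fun x _ => ?_)
  by_cases h1 : x = '/'; · subst h1; rfl
  by_cases h2 : x = '\\'; · subst h2; rfl
  by_cases h3 : x = ':'; · subst h3; rfl
  by_cases h4 : x = '|'; · subst h4; rfl
  by_cases h5 : x = '\n'; · subst h5; rfl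
  by_cases h6 : x = '\r'; · subst h6; rfl
  by_cases h7 : x = '\t'; · subst h7; rfl
  simp [Function.comp, h1, h2, h3, h4, h5, h6, h7, slugSub, slugSpecial]

lemma spGo_filter_ne_nil (l : List Char) : ∀ cur, cur ≠ [] →
    (spGo l cur).filter (fun p => p ≠ []) ≠ [] := by
  induction l with
  | nil => intro cur h; simp [spGo, h]
  | cons c rest ih =>
    intro cur h
    by_cases hc : c = ' '
    · subst hc; simp [spGo, h]
    · simpa [spGo, hc] using ih (c :: cur) (by simp)

-- main correspondence between A's split/filter/join and B's scan
lemma join_filter_spGo (l : List Char) :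
    (∀ cur : List Char, cur ≠ [] →
       PySem.Chars.join ['_'] (((spGo (l.map slugSub) cur)).filter (fun p => p ≠ []))
         = cur.reverse ++ slugScan l false)
    ∧ ((if ((spGo (l.map slugSub) []).filter (fun p => p ≠ [])) = [] then ([] : List Char)
        else '_' :: PySem.Chars.join ['_'] (((spGo (l.map slugSub) [])).filter (fun p => p ≠ [])))
        = slugScan l true) := by
  induction l with
  | nil =>
    constructor
    · intro cur hcur
      simp [spGo, slugScan, List.filter_cons, hcur, PySem.Chars.join_singleton]
    · simp [spGo, slugScan]
  | cons c t ih =>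
    obtain ⟨ih1, ih2⟩ := ih
    have hsub : ∀ x : Char, x ≠ ' ' → slugSub x ≠ ' ' := by
      intro x hx
      simp only [slugSub]
      split_ifs <;> simp [hx]
    constructor
    · intro cur hcur
      by_cases hc : c = ' '
      · subst hc
        simp only [List.map_cons, show slugSub ' ' = ' ' from rfl]
        rw [show spGo (' ' :: List.map slugSub t) cur = cur.reverse :: spGo (List.map slugSub t) []
              from by simp [spGo]]
        rw [List.filter_cons_of_pos (by simp [hcur])]
        rcases hF : (spGo (t.map slugSub) []).filter (fun p => p ≠ []) with _ | ⟨x, xs⟩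
        · rw [PySem.Chars.join_singleton]
          have h2 := ih2
          rw [hF] at h2
          simp only [if_pos rfl] at h2
          simp [slugScan, ← h2]
        · rw [PySem.Chars.join_cons_cons]
          have h2 := ih2
          rw [hF] at h2
          simp only [if_neg (List.cons_ne_nil x xs)] at h2
          simp [slugScan, ← h2]
      · simp only [List.map_cons, spGo, if_neg (hsub c hc)]
        rw [ih1 (slugSub c :: cur) (List.cons_ne_nil _ _)]
        simp [slugScan, hc]
    · by_cases hc : c = ' '
      · subst hc
        simp only [List.map_cons, show slugSub ' ' = ' ' from rfl]
        rw [show spGo (' ' :: List.map slugSub t) [] = [].reverse :: spGo (List.map slugSub t) []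
              from by simp [spGo]]
        rw [List.filter_cons_of_neg (by simp)]
        simpa [slugScan] using ih2
      · simp only [List.map_cons, spGo, if_neg (hsub c hc)]
        rw [if_neg (spGo_filter_ne_nil (t.map slugSub) [slugSub c] (List.cons_ne_nil _ _))]
        rw [ih1 [slugSub c] (List.cons_ne_nil _ _)]
        simp [slugScan, hc]

-- B's foldl computes the scan
lemma foldl_scan (l : List Char) : ∀ (out : List Char) (p : Bool),
    (l.foldl
      (fun (st : List Char × Bool) ch =>
        if ch = ' ' then (st.1, true)
        else ((if st.2 then st.1 ++ ['_'] else st.1) ++ [if slugSpecial ch then '_' else ch], false))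
      (out, p)).1 = out ++ slugScan l p := by
  induction l with
  | nil => intro out p; simp [slugScan]
  | cons c t ih =>
    intro out p
    by_cases hc : c = ' '
    · subst hc
      simp only [List.foldl_cons, if_pos rfl]
      rw [ih]
      simp [slugScan]
    · simp only [List.foldl_cons, if_neg hc]
      rw [ih]
      simp only [slugScan, if_neg hc, slugSub]
      split_ifs <;> simp

lemma strip_head_not_space (s : String) (c : Char) (t : List Char)
    (h : (PySem.Str.strip s).toList = c :: t) : c ≠ ' ' := by
  have h' : (List.dropWhile PySem.Chars.isspace
      ((List.dropWhile PySem.Chars.isspace s.toList).reverse)).reverse = c :: t := by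
    simpa [PySem.Str.strip, PySem.Chars.strip, PySem.Chars.rstrip, PySem.Chars.lstrip] using h
  have hz : List.dropWhile PySem.Chars.isspace
      ((List.dropWhile PySem.Chars.isspace s.toList).reverse) = (c :: t).reverse := by
    rw [← h']; simp
  obtain ⟨u, hu⟩ := List.dropWhile_suffix (l := (List.dropWhile PySem.Chars.isspace s.toList).reverse)
    (p := PySem.Chars.isspace)
  rw [hz] at hu
  have hy : List.dropWhile PySem.Chars.isspace s.toList = c :: (t ++ u.reverse) := by
    have h2 := congrArg List.reverse hu
    rw [List.reverse_append, List.reverse_reverse, List.reverse_reverse] at h2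
    rw [← h2]; simp
  have hns := List.head?_dropWhile_not PySem.Chars.isspace s.toList
  rw [hy] at hns
  simp only [List.head?_cons] at hns
  intro hc
  subst hc
  simp [PySem.Chars.isspace] at hns

-- ===== VERDICT (by name: the statement is the Claim_ definition above) =====
theorem safe_slug_spec : Claim_equal_safe_slug := by
  unfold Claim_equal_safe_slug Spec_safe_slug
  intro text _
  unfold safe_slug safe_slug_alt
  by_cases h0 : PySem.Str.strip (if text = "" then "" else text) = ""
  · simp [h0]
  · simp only [if_neg h0]
    obtain ⟨c, t, hct⟩ : ∃ c t, (PySem.Str.strip (if text = "" then "" else text)).toList = c :: t := by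
      rcases hsl : (PySem.Str.strip (if text = "" then "" else text)).toList with _ | ⟨c, t⟩
      · exact absurd (String.toList_eq_nil_iff.mp hsl) h0
      · exact ⟨c, t, rfl⟩
    have hcsp : c ≠ ' ' := strip_head_not_space _ c t hct
    rw [replaces_eq_map, hct]
    rw [splitOn_space]
    simp only [List.map_cons, spGo,
      if_neg (by
        simp only [slugSub]
        split_ifs <;> simp [hcsp] : slugSub c ≠ ' ')]
    rw [(join_filter_spGo t).1 [slugSub c] (List.cons_ne_nil _ _)]
    rw [foldl_scan]
    simp only [slugScan, if_neg hcsp, List.reverse_singleton]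
    rw [PySem.Chars.slice_eq_listSlice, PySem.List.slice_to _ (by norm_num)]
    simp
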